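-- pv_equiv track=rewrite | github.com/giedrius73/MULTI-EPG | merge_epg.py | pick_lang
-- ===== SOURCE A (Python) =====
-- LANG_PRIORITY = ["lt", "ru", "en"]
--
-- def pick_lang(elements):
--     if not elements:
--         return None
--     by_lang = {}
--     for el in elements:
--         lang = el.get("lang", "").lower()
--         by_lang.setdefault(lang, []).append(el)
--     for lang in LANG_PRIORITY:
--         if lang in by_lang:
--             return by_lang[lang][0]
--     return elements[0]
-- ===== SOURCE B (Python) =====
-- LANG_PRIORITY = ["lt", "ru", "en"]
--
-- def _rank(el):
--     lang = el.get("lang", "").lower()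
--     if lang == "lt":
--         return 0
--     if lang == "ru":
--         return 1
--     if lang == "en":
--         return 2
--     return 3
--
-- def pick_lang(elements):
--     if not elements:
--         return None
--     best = None
--     best_rank = 3
--     for el in elements:
--         r = _rank(el)
--         if r < best_rank:
--             best = el
--             best_rank = r
--     return best if best_rank < 3 else elements[0]
-- ===== Notes on version B (the rewrite author's own statement) =====
-- stated objective: simpler
-- what changed: Replaced the dict-of-lists grouping plus a second scan over LANG_PRIORITY by a single pass that tracks the element with the strictly smallest priority rank, falling back to elements[0] when no priority language occurs.
import Mathlib
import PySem

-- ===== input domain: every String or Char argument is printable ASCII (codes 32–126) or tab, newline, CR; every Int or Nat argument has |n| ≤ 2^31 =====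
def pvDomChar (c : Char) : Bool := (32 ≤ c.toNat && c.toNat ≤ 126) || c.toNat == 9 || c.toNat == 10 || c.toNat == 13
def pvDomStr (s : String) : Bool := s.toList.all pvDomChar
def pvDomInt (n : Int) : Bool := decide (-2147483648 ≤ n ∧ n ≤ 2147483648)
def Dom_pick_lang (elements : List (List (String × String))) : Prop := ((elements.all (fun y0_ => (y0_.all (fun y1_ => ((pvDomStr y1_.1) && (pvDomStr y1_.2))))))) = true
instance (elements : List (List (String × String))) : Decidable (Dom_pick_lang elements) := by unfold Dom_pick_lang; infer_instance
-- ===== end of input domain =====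

-- B replaces A's dict-of-lists grouping + priority scan by a single pass tracking the
-- element of strictly smallest priority rank (objective: simpler).

-- el.get("lang", "").lower(), shared by both ports (same Python expression in both sources)
def pvLangOf (el : List (String × String)) : String :=
  PySem.Str.lower (PySem.Dict.getD (PySem.Dict.mk el) "lang" "")

-- ===== PORT A =====
-- the second Python loop: for lang in LANG_PRIORITY: if lang in by_lang: return by_lang[lang][0]
def pvPrioLoop (prio : List String) (d : PySem.Dict String (List (List (String × String)))) :
    Option (List (String × String)) :=
  match prio with
  | [] => none
  | lang :: rest =>
    if PySem.Dict.contains d lang then PySem.List.pyGet? (PySem.Dict.getD d lang []) 0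
    else pvPrioLoop rest d

def pick_lang (elements : List (List (String × String))) : Option (List (String × String)) :=
  if elements = [] then none
  else
    -- by_lang.setdefault(lang, []).append(el)  ≡  d[lang] = d.get(lang, []) + [el]
    let by_lang := elements.foldl
      (fun d el => PySem.Dict.modify d (pvLangOf el) [] (· ++ [el]))
      (PySem.Dict.empty : PySem.Dict String (List (List (String × String))))
    match pvPrioLoop ["lt", "ru", "en"] by_lang with
    | some e => some e
    | none => PySem.List.pyGet? elements 0

-- ===== PORT B =====
def pvRank (el : List (String × String)) : Nat :=
  if pvLangOf el = "lt" then 0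
  else if pvLangOf el = "ru" then 1
  else if pvLangOf el = "en" then 2
  else 3

def pick_lang_alt (elements : List (List (String × String))) : Option (List (String × String)) :=
  if elements = [] then none
  else
    let acc := elements.foldl
      (fun acc el => if pvRank el < acc.2 then (some el, pvRank el) else acc)
      ((none : Option (List (String × String))), 3)
    if acc.2 < 3 then acc.1 else PySem.List.pyGet? elements 0

-- ===== PRECONDITION & SPEC =====
def Spec_pick_lang (elements : List (List (String × String))) (out : Option (List (String × String))) : Prop := out = pick_lang_alt elements
instance (elements : List (List (String × String))) (out : Option (List (String × String))) : Decidable (Spec_pick_lang elements out) := by unfold Spec_pick_lang; infer_instance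

-- ===== CLAIM (what is proved, stated in full; the proofs are below) =====
def Claim_equal_pick_lang : Prop := ∀ (elements : List (List (String × String))), Dom_pick_lang elements → Spec_pick_lang elements (pick_lang elements)

-- ===== LEMMAS AND PROOFS =====

-- running minimum of pvRank over a list, starting from r
def pvM : List (List (String × String)) → Nat → Nat
  | [], r => r
  | el :: rest, r => pvM rest (min r (pvRank el))

theorem pvM_le (es : List (List (String × String))) : ∀ r, pvM es r ≤ r := by
  induction es with
  | nil => intro r; simp [pvM]
  | cons el rest ih =>
    intro r
    exact le_trans (ih (min r (pvRank el))) (Nat.min_le_left _ _)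

theorem pvM_le_of_mem (es : List (List (String × String))) :
    ∀ r el, el ∈ es → pvM es r ≤ pvRank el := by
  induction es with
  | nil => intro r el h; cases h
  | cons e rest ih =>
    intro r el h
    rcases List.mem_cons.mp h with h | h
    · subst h
      exact le_trans (pvM_le rest _) (Nat.min_le_right _ _)
    · exact ih _ el h

theorem pvM_lb (es : List (List (String × String))) :
    ∀ r k, k ≤ r → (∀ el ∈ es, k ≤ pvRank el) → k ≤ pvM es r := by
  induction es with
  | nil => intro r k hk _; simpa [pvM] using hk
  | cons e rest ih =>
    intro r k hk hall
    refine ih _ k ?_ (fun el h => hall el (List.mem_cons_of_mem _ h))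
    exact le_min hk (hall e (List.mem_cons_self))

theorem pvRank_le_three (el : List (String × String)) : pvRank el ≤ 3 := by
  unfold pvRank; split_ifs <;> omega

-- characterization of B's fold
theorem foldB (es : List (List (String × String))) :
    ∀ (b : Option (List (String × String))) (r : Nat),
    es.foldl (fun acc el => if pvRank el < acc.2 then (some el, pvRank el) else acc) (b, r)
      = (if pvM es r < r then es.find? (fun el => decide (pvRank el ≤ pvM es r)) else b, pvM es r) := by
  induction es with
  | nil => intro b r; simp [pvM]
  | cons el rest ih =>
    intro b r
    have step : (el :: rest).foldl (fun acc el => if pvRank el < acc.2 then (some el, pvRank el) else acc) (b, r)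
        = rest.foldl (fun acc el => if pvRank el < acc.2 then (some el, pvRank el) else acc)
            (if pvRank el < r then (some el, pvRank el) else (b, r)) := rfl
    rw [step]
    by_cases h : pvRank el < r
    · have hmin : min r (pvRank el) = pvRank el := by omega
      have hM : pvM (el :: rest) r = pvM rest (pvRank el) := by simp [pvM, hmin]
      have hMle : pvM rest (pvRank el) ≤ pvRank el := pvM_le rest _
      rw [if_pos h, hM, ih (some el) (pvRank el)]
      by_cases h2 : pvM rest (pvRank el) < pvRank el
      · have hlt : pvM rest (pvRank el) < r := lt_trans h2 h
        have hpred : (decide (pvRank el ≤ pvM rest (pvRank el))) = false := by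
          simp; omega
        rw [if_pos h2, if_pos hlt, List.find?_cons, hpred]
      · have heq : pvM rest (pvRank el) = pvRank el := le_antisymm hMle (Nat.le_of_not_lt h2)
        have hlt : pvM rest (pvRank el) < r := by omega
        have hpred : (decide (pvRank el ≤ pvM rest (pvRank el))) = true := by
          simp [heq]
        rw [if_neg h2, if_pos hlt, List.find?_cons, hpred]
    · have hmin : min r (pvRank el) = r := by omega
      have hM : pvM (el :: rest) r = pvM rest r := by simp [pvM, hmin]
      rw [if_neg h, hM, ih b r]
      by_cases h2 : pvM rest r < r
      · have hpred : (decide (pvRank el ≤ pvM rest r)) = false := by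
          simp; omega
        rw [if_pos h2, if_pos h2, List.find?_cons, hpred]
      · rw [if_neg h2, if_neg h2]

-- the grouping dict: getD and contains after the build loop
theorem build_getD (es : List (List (String × String))) :
    ∀ (d : PySem.Dict String (List (List (String × String)))) (lang : String),
    PySem.Dict.getD (es.foldl (fun d el => PySem.Dict.modify d (pvLangOf el) [] (· ++ [el])) d) lang []
      = PySem.Dict.getD d lang [] ++ es.filter (fun el => pvLangOf el == lang) := by
  induction es with
  | nil => intro d lang; simp
  | cons el rest ih =>
    intro d lang
    rw [List.foldl_cons, ih]
    by_cases h : pvLangOf el = lang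
    · subst h
      simp [List.filter_cons, PySem.Dict.getD_modify]
    · have hb : (pvLangOf el == lang) = false := by simp [h]
      simp [List.filter_cons, hb, PySem.Dict.getD_modify, Ne.symm h]

theorem build_contains (es : List (List (String × String))) :
    ∀ (d : PySem.Dict String (List (List (String × String)))) (lang : String),
    PySem.Dict.contains (es.foldl (fun d el => PySem.Dict.modify d (pvLangOf el) [] (· ++ [el])) d) lang
      = (PySem.Dict.contains d lang || es.any (fun el => pvLangOf el == lang)) := by
  induction es with
  | nil => intro d lang; simp
  | cons el rest ih =>
    intro d lang
    rw [List.foldl_cons, ih]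
    by_cases h : pvLangOf el = lang
    · subst h
      simp [PySem.Dict.contains_modify]
    · have hb : (pvLangOf el == lang) = false := by simp [h]
      have hb' : (lang == pvLangOf el) = false := by simp [Ne.symm h]
      simp [PySem.Dict.contains_modify, hb, hb']

theorem find?_congr_mem {α : Type} (l : List α) (p q : α → Bool)
    (h : ∀ a ∈ l, p a = q a) : l.find? p = l.find? q := by
  induction l with
  | nil => rfl
  | cons x xs ih =>
    have hx := h x (List.mem_cons_self)
    rw [List.find?_cons, List.find?_cons, hx, ih (fun a ha => h a (List.mem_cons_of_mem _ ha))]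

theorem head?_filter' {α : Type} (l : List α) (p : α → Bool) :
    (l.filter p).head? = l.find? p := by
  induction l with
  | nil => rfl
  | cons x xs ih =>
    by_cases h : p x
    · simp [List.filter_cons, List.find?_cons, h]
    · simp [List.filter_cons, List.find?_cons, h, ih]

-- rank ↔ language correspondences
theorem pvRank_eq_zero_iff (el : List (String × String)) : pvRank el = 0 ↔ pvLangOf el = "lt" := by
  unfold pvRank; split_ifs <;> simp_all
theorem pvRank_eq_one_iff (el : List (String × String)) : pvRank el = 1 ↔ pvLangOf el = "ru" := by
  unfold pvRank; split_ifs <;> simp_all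
theorem pvRank_eq_two_iff (el : List (String × String)) : pvRank el = 2 ↔ pvLangOf el = "en" := by
  unfold pvRank; split_ifs <;> simp_all

-- the priority scan, on the built dict, selects find? of the best present language
theorem find?_some_of_any {α : Type} (l : List α) (p : α → Bool) (hl : l.any p = true) :
    ∃ e, l.find? p = some e := by
  cases hfe : l.find? p with
  | some e => exact ⟨e, rfl⟩
  | none =>
    obtain ⟨x, hx, hpx⟩ := List.any_eq_true.mp hl
    exact absurd hpx (by simpa using List.find?_eq_none.mp hfe x hx)

-- ===== VERDICT (by name: the statement is the Claim_ definition above) =====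
theorem pick_lang_spec : Claim_equal_pick_lang := by
  intro es _
  unfold Spec_pick_lang pick_lang pick_lang_alt
  by_cases hnil : es = []
  · simp [hnil]
  · simp only [if_neg hnil]
    rw [foldB es none 3]
    simp only [pvPrioLoop, build_contains, build_getD,
      PySem.Dict.contains_empty, PySem.Dict.getD_empty, Bool.false_or, List.nil_append]
    by_cases hlt : es.any (fun el => pvLangOf el == "lt") = true
    · -- some element has lang "lt": M = 0
      obtain ⟨el0, hmem, hel0⟩ := List.any_eq_true.mp hlt
      have h0 : pvRank el0 = 0 := (pvRank_eq_zero_iff el0).mpr (by simpa using hel0)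
      have hM : pvM es 3 = 0 := Nat.le_zero.mp (h0 ▸ pvM_le_of_mem es 3 el0 hmem)
      obtain ⟨e, he⟩ := find?_some_of_any es _ hlt
      have hfilter : PySem.List.pyGet? (es.filter (fun el => pvLangOf el == "lt")) 0 = some e := by
        rw [PySem.List.pyGet?_zero, ← List.head?_eq_getElem?, head?_filter', he]
      have hq : es.find? (fun el => decide (pvRank el ≤ pvM es 3)) = some e := by
        rw [← he]
        apply find?_congr_mem
        intro a _
        simp only [hM, Nat.le_zero, pvRank_eq_zero_iff]
        by_cases hx : pvLangOf a = "lt" <;> simp [hx]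
      have key : (if pvM es 3 < 3 then es.find? (fun el => decide (pvRank el ≤ pvM es 3)) else none) = some e := by
        rw [if_pos (by omega : pvM es 3 < 3)]; exact hq
      rw [if_pos hlt, hfilter, key, hM]
      simp
    · have hne0 : ∀ el ∈ es, pvRank el ≠ 0 := by
        intro el h hc
        exact hlt (List.any_eq_true.mpr ⟨el, h, by simp [(pvRank_eq_zero_iff el).mp hc]⟩)
      simp only [hlt, if_false, Bool.false_eq_true]
      by_cases hru : es.any (fun el => pvLangOf el == "ru") = true
      · obtain ⟨el0, hmem, hel0⟩ := List.any_eq_true.mp hru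
        have h1 : pvRank el0 = 1 := (pvRank_eq_one_iff el0).mpr (by simpa using hel0)
        have hle : pvM es 3 ≤ 1 := h1 ▸ pvM_le_of_mem es 3 el0 hmem
        have hge : 1 ≤ pvM es 3 := pvM_lb es 3 1 (by omega)
          (fun el h => Nat.one_le_iff_ne_zero.mpr (hne0 el h))
        have hM : pvM es 3 = 1 := le_antisymm hle hge
        obtain ⟨e, he⟩ := find?_some_of_any es _ hru
        have hfilter : PySem.List.pyGet? (es.filter (fun el => pvLangOf el == "ru")) 0 = some e := by
          rw [PySem.List.pyGet?_zero, ← List.head?_eq_getElem?, head?_filter', he]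
        have hq : es.find? (fun el => decide (pvRank el ≤ pvM es 3)) = some e := by
          rw [← he]
          apply find?_congr_mem
          intro a ha
          have hz := hne0 a ha
          have h1iff := pvRank_eq_one_iff a
          by_cases hr : pvRank a = 1
          · simp_all
          · have hx : ¬ pvRank a ≤ 1 := by omega
            have hy : ¬ pvLangOf a = "ru" := fun hcc => hr (h1iff.mpr hcc)
            simp [hM, hx, hy]
        have key : (if pvM es 3 < 3 then es.find? (fun el => decide (pvRank el ≤ pvM es 3)) else none) = some e := by
          rw [if_pos (by omega : pvM es 3 < 3)]; exact hq
        rw [if_pos hru, hfilter, key, hM]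
        simp
      · have hne1 : ∀ el ∈ es, pvRank el ≠ 1 := by
          intro el h hc
          exact hru (List.any_eq_true.mpr ⟨el, h, by simp [(pvRank_eq_one_iff el).mp hc]⟩)
        simp only [hru, if_false, Bool.false_eq_true]
        by_cases hen : es.any (fun el => pvLangOf el == "en") = true
        · obtain ⟨el0, hmem, hel0⟩ := List.any_eq_true.mp hen
          have h2 : pvRank el0 = 2 := (pvRank_eq_two_iff el0).mpr (by simpa using hel0)
          have hle : pvM es 3 ≤ 2 := h2 ▸ pvM_le_of_mem es 3 el0 hmem
          have hge : 2 ≤ pvM es 3 := pvM_lb es 3 2 (by omega)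
            (fun el h => by have := hne0 el h; have := hne1 el h; omega)
          have hM : pvM es 3 = 2 := le_antisymm hle hge
          obtain ⟨e, he⟩ := find?_some_of_any es _ hen
          have hfilter : PySem.List.pyGet? (es.filter (fun el => pvLangOf el == "en")) 0 = some e := by
            rw [PySem.List.pyGet?_zero, ← List.head?_eq_getElem?, head?_filter', he]
          have hq : es.find? (fun el => decide (pvRank el ≤ pvM es 3)) = some e := by
            rw [← he]
            apply find?_congr_mem
            intro a ha
            have hz := hne0 a ha
            have ho := hne1 a ha
            have h2iff := pvRank_eq_two_iff a
            by_cases hr : pvRank a = 2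
            · simp_all
            · have hx : ¬ pvRank a ≤ 2 := by omega
              have hy : ¬ pvLangOf a = "en" := fun hcc => hr (h2iff.mpr hcc)
              simp [hM, hx, hy]
          have key : (if pvM es 3 < 3 then es.find? (fun el => decide (pvRank el ≤ pvM es 3)) else none) = some e := by
            rw [if_pos (by omega : pvM es 3 < 3)]; exact hq
          rw [if_pos hen, hfilter, key, hM]
          simp
        · have hne2 : ∀ el ∈ es, pvRank el ≠ 2 := by
            intro el h hc
            exact hen (List.any_eq_true.mpr ⟨el, h, by simp [(pvRank_eq_two_iff el).mp hc]⟩)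
          have hge : 3 ≤ pvM es 3 := pvM_lb es 3 3 (by omega)
            (fun el h => by
              have := hne0 el h; have := hne1 el h; have := hne2 el h
              have := pvRank_le_three el; omega)
          have hM : pvM es 3 = 3 := le_antisymm (pvM_le es 3) hge
          rw [if_neg hen, hM]
          simp
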